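-- pv_equiv track=rewrite | github.com/Tandx01/Academic_Projects | Python/hw2/hw2_part_a.py | is_relatively_prime
-- ===== SOURCE A (Python) =====
-- def is_relatively_prime(first, second):
--
--     """Takes two integers and returns True if the two integers are
--     relatively prime and returns False otherwise. """
--
--     first_num = first
--     second_num = second
--     if second_num > first_num:
--         (first_num, second_num)=(second_num,first_num)
--
--     while second_num !=0 :
--         module_1 = first_num%second_num
--         first_num = second_num
--         second_num = module_1
--     if first_num == 1:
--         return True
--     return False
-- ===== SOURCE B (Python) =====
-- def is_relatively_prime(first, second):
--     def gcd(a, b):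
--         return a if b == 0 else gcd(b, a % b)
--     return gcd(max(first, second), min(first, second)) == 1
-- ===== Notes on version B (the rewrite author's own statement) =====
-- stated objective: simpler
-- what changed: Replaces the mutating while-loop with a recursive Euclidean gcd helper and the conditional tuple swap with max/min, comparing the final value to 1 as A does.
import Mathlib
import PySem

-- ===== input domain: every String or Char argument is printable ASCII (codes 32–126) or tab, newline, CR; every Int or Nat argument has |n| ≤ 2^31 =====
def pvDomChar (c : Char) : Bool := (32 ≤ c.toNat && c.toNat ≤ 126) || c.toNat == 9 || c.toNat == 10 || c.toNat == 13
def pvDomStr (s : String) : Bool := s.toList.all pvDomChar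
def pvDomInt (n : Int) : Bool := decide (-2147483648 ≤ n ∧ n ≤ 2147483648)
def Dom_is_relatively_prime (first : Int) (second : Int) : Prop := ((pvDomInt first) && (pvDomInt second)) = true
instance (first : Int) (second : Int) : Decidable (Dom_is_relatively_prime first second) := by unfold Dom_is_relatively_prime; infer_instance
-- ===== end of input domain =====

-- B: recursive Euclidean gcd helper + max/min instead of A's mutating while-loop with a conditional swap; simpler decomposition, same result.


-- termination helper for both ports: Python's % shrinks the divisor's absolute value
theorem pvModNatAbsLt (a b : Int) (hb : b ≠ 0) : (PySem.Int.mod a b).natAbs < b.natAbs := by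
  rcases lt_or_gt_of_ne hb with h | h
  · have := PySem.Int.mod_neg_bounds a h
    omega
  · have h1 := PySem.Int.mod_nonneg a h
    have h2 := PySem.Int.mod_lt a h
    omega

-- ===== PORT A =====
-- the while loop of A: state (first_num, second_num)
def pvLoopA (a b : Int) : Bool :=
  if h : b ≠ 0 then pvLoopA b (PySem.Int.mod a b)
  else (a == 1)
termination_by b.natAbs
decreasing_by exact pvModNatAbsLt a b h

def is_relatively_prime (first : Int) (second : Int) : Bool :=
  let p := if second > first then (second, first) else (first, second)
  pvLoopA p.1 p.2

-- ===== PORT B =====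
def pvGcdB (a b : Int) : Int :=
  if h : b == 0 then a
  else pvGcdB b (PySem.Int.mod a b)
termination_by b.natAbs
decreasing_by exact pvModNatAbsLt a b (by simpa using h)

def is_relatively_prime_alt (first : Int) (second : Int) : Bool :=
  pvGcdB (max first second) (min first second) == 1

-- ===== PRECONDITION & SPEC =====
def Spec_is_relatively_prime (first : Int) (second : Int) (out : Bool) : Prop := out = is_relatively_prime_alt first second
instance (first : Int) (second : Int) (out : Bool) : Decidable (Spec_is_relatively_prime first second out) := by unfold Spec_is_relatively_prime; infer_instance

-- ===== CLAIM (what is proved, stated in full; the proofs are below) =====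
def Claim_equal_is_relatively_prime : Prop := ∀ (first : Int) (second : Int), Dom_is_relatively_prime first second → Spec_is_relatively_prime first second (is_relatively_prime first second)

-- ===== LEMMAS AND PROOFS =====
theorem pvLoopA_eq_gcdB (b a : Int) : pvLoopA a b = (pvGcdB a b == 1) := by
  induction hn : b.natAbs using Nat.strong_induction_on generalizing a b with
  | _ n ih =>
    by_cases hb : b = 0
    · subst hb; rw [pvLoopA, pvGcdB]; simp
    · rw [pvLoopA, pvGcdB, dif_pos hb, dif_neg (by simpa using hb)]
      subst hn
      exact ih _ (pvModNatAbsLt a b hb) _ _ rfl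

-- ===== VERDICT (by name: the statement is the Claim_ definition above) =====
theorem is_relatively_prime_spec : Claim_equal_is_relatively_prime := by
  intro first second _
  unfold Spec_is_relatively_prime is_relatively_prime is_relatively_prime_alt
  by_cases h : second > first
  · rw [if_pos h]
    rw [max_eq_right (le_of_lt h), min_eq_left (le_of_lt h), pvLoopA_eq_gcdB]
  · rw [if_neg h]
    rw [max_eq_left (le_of_not_gt h), min_eq_right (le_of_not_gt h), pvLoopA_eq_gcdB]
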